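-- pv_equiv track=rewrite | github.com/mauriciocucco/gaia | src/hf_gaia_agent/source_pipeline.py | _split_rendered_tables
-- ===== SOURCE A (Python) =====
-- def _split_rendered_tables(content: str) -> list[str]:
--     sections: list[str] = []
--     current: list[str] = []
--     for raw_line in content.splitlines():
--         line = raw_line.rstrip()
--         if line.startswith("Table ") and current:
--             sections.append("\n".join(current).strip())
--             current = [line]
--             continue
--         current.append(line)
--     if current:
--         sections.append("\n".join(current).strip())
--     return [section for section in sections if section]
-- ===== SOURCE B (Python) =====
-- def _split_rendered_tables(content: str) -> list[str]:
--     lines = [raw.rstrip() for raw in content.splitlines()]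
--     groups = []
--     while lines:
--         head, rest = lines[0], lines[1:]
--         k = 0
--         while k < len(rest) and not rest[k].startswith("Table "):
--             k += 1
--         groups.append([head] + rest[:k])
--         lines = rest[k:]
--     return [s for s in ("\n".join(g).strip() for g in groups) if s]
-- ===== Notes on version B (the rewrite author's own statement) =====
-- stated objective: alternative
-- what changed: Replaces A's single-pass accumulator state machine with a two-phase shape: rstrip all lines first, then repeatedly split off one whole section by scanning the span up to the next 'Table ' boundary line and slicing it out.
import Mathlib
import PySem

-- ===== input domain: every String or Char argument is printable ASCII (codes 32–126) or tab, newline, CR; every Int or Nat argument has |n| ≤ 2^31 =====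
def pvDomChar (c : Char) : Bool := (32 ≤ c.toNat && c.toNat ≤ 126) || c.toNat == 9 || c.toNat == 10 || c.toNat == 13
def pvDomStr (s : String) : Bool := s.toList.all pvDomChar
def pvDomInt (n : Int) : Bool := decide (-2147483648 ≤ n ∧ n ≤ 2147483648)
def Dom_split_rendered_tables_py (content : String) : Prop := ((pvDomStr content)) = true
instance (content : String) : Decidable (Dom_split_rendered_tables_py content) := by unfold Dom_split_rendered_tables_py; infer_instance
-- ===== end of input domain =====

-- B replaces A's accumulator state machine by a two-phase shape (rstrip all lines first, then
-- repeatedly slice off one section span up to the next "Table " boundary line); alternative, not faster.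

-- ===== PORT A =====
-- "\n".join(cur).strip()  (this exact expression appears in both Pythons)
def pvJoinStrip (cur : List String) : String := PySem.Str.strip (PySem.Str.join "\n" cur)

-- one iteration of A's for-loop over the state (sections, current)
def pvStepA (st : List String × List String) (raw : String) : List String × List String :=
  let line := PySem.Str.rstrip raw
  if PySem.Str.startswith line "Table " && !st.2.isEmpty then
    (st.1 ++ [pvJoinStrip st.2], [line])
  else
    (st.1, st.2 ++ [line])

def split_rendered_tables_py (content : String) : List String :=
  let st := (PySem.Str.splitlines content).foldl pvStepA ([], [])
  let sections := if !st.2.isEmpty then st.1 ++ [pvJoinStrip st.2] else st.1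
  sections.filter (fun s => s ≠ "")

-- ===== PORT B =====
-- B's inner while loop: k = number of leading lines of rest that do not start with "Table "
def pvSpanLen : List String → Nat
  | [] => 0
  | x :: xs => if PySem.Str.startswith x "Table " then 0 else pvSpanLen xs + 1

-- B's outer while loop: peel off one group [head] + rest[:k], continue on rest[k:]
def pvAltGo (acc : List (List String)) : List String → List (List String)
  | [] => acc
  | head :: rest =>
    let k := pvSpanLen rest
    pvAltGo (acc ++ [head :: rest.take k]) (rest.drop k)
termination_by ls => ls.length
decreasing_by simp [List.length_drop]

def split_rendered_tables_py_alt (content : String) : List String :=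
  let lines := (PySem.Str.splitlines content).map PySem.Str.rstrip
  let gs := pvAltGo [] lines
  (gs.map pvJoinStrip).filter (fun s => s ≠ "")

-- ===== PRECONDITION & SPEC =====
def Spec_split_rendered_tables_py (content : String) (out : List String) : Prop := out = split_rendered_tables_py_alt content
instance (content : String) (out : List String) : Decidable (Spec_split_rendered_tables_py content out) := by unfold Spec_split_rendered_tables_py; infer_instance

-- ===== CLAIM (what is proved, stated in full; the proofs are below) =====
def Claim_equal_split_rendered_tables_py : Prop := ∀ (content : String), Dom_split_rendered_tables_py content → Spec_split_rendered_tables_py content (split_rendered_tables_py content)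

-- ===== LEMMAS AND PROOFS =====

-- the (negated) boundary predicate: the line does NOT start a new table section
def pvP (l : String) : Bool := !(PySem.Str.startswith l "Table ")

-- canonical grouping both programs compute
def pvGroups : List String → List (List String)
  | [] => []
  | l :: ls => (l :: ls.takeWhile pvP) :: pvGroups (ls.dropWhile pvP)
termination_by ls => ls.length
decreasing_by have := List.length_dropWhile_le pvP ls; simp; omega

-- A's loop step after the rstrip has been pulled out of the loop
def pvStep (st : List String × List String) (line : String) : List String × List String :=
  if PySem.Str.startswith line "Table " && !st.2.isEmpty then
    (st.1 ++ [pvJoinStrip st.2], [line])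
  else
    (st.1, st.2 ++ [line])

-- A's finalization of the state after the loop
def pvFinal (st : List String × List String) : List String :=
  if !st.2.isEmpty then st.1 ++ [pvJoinStrip st.2] else st.1

theorem pvSpanLen_eq (xs : List String) : pvSpanLen xs = (xs.takeWhile pvP).length := by
  induction xs with
  | nil => rfl
  | cons x xs ih =>
    by_cases h : PySem.Chars.startswith x.toList ['T', 'a', 'b', 'l', 'e', ' '] = true <;>
      simp [pvSpanLen, pvP, h, ih]

theorem pvTake (xs : List String) : xs.take (xs.takeWhile pvP).length = xs.takeWhile pvP := by
  induction xs with
  | nil => rfl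
  | cons x xs ih =>
    by_cases h : pvP x = true <;> simp [h, ih]

theorem pvDrop (xs : List String) : xs.drop (xs.takeWhile pvP).length = xs.dropWhile pvP := by
  induction xs with
  | nil => rfl
  | cons x xs ih =>
    by_cases h : pvP x = true <;> simp [h, ih]

theorem pvAltGo_eq (ls : List String) : ∀ acc, pvAltGo acc ls = acc ++ pvGroups ls := by
  induction ls using pvGroups.induct with
  | case1 => intro acc; rw [pvAltGo, pvGroups]; simp
  | case2 l ls ih =>
    intro acc
    rw [pvAltGo, pvGroups]
    simp only [pvSpanLen_eq, pvTake, pvDrop]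
    rw [ih]
    simp

theorem pvFoldA (ls : List String) : ∀ secs cur, cur ≠ [] →
    pvFinal (ls.foldl pvStep (secs, cur))
    = secs ++ ((cur ++ ls.takeWhile pvP) :: pvGroups (ls.dropWhile pvP)).map pvJoinStrip := by
  induction ls with
  | nil =>
    intro secs cur hcur
    simp only [List.foldl_nil, List.takeWhile_nil, List.dropWhile_nil]
    rw [pvGroups]
    simp [pvFinal, hcur]
  | cons l ls ih =>
    intro secs cur hcur
    by_cases h : PySem.Chars.startswith l.toList ['T', 'a', 'b', 'l', 'e', ' '] = true
    · have hstep : pvStep (secs, cur) l = (secs ++ [pvJoinStrip cur], [l]) := by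
        simp [pvStep, h, hcur]
      rw [List.foldl_cons, hstep, ih _ [l] (by simp)]
      rw [List.takeWhile_cons, List.dropWhile_cons]
      simp [pvP, h]
      rw [pvGroups]
      simp
    · have hstep : pvStep (secs, cur) l = (secs, cur ++ [l]) := by
        simp [pvStep, h]
      rw [List.foldl_cons, hstep, ih _ (cur ++ [l]) (by simp)]
      rw [List.takeWhile_cons, List.dropWhile_cons]
      simp [pvP, h]

-- A's whole function, with the rstrip pulled out of the loop
theorem pvA_eq (content : String) :
    split_rendered_tables_py content
    = (pvFinal (((PySem.Str.splitlines content).map PySem.Str.rstrip).foldl pvStep ([], []))).filter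
        (fun s => s ≠ "") := by
  unfold split_rendered_tables_py pvFinal
  simp only [List.foldl_map]
  rfl

theorem pvBoth (lines : List String) :
    (pvFinal (lines.foldl pvStep ([], []))).filter (fun s => s ≠ "")
    = ((pvAltGo [] lines).map pvJoinStrip).filter (fun s => s ≠ "") := by
  cases lines with
  | nil =>
    rw [pvAltGo]
    simp [pvFinal]
  | cons l ls =>
    have hfirst : pvStep ([], []) l = ([], [l]) := by simp [pvStep]
    rw [List.foldl_cons, hfirst, pvFoldA ls [] [l] (by simp), pvAltGo_eq, pvGroups]
    simp

-- ===== VERDICT (by name: the statement is the Claim_ definition above) =====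
theorem split_rendered_tables_py_spec : Claim_equal_split_rendered_tables_py := by
  intro content _
  unfold Spec_split_rendered_tables_py
  rw [pvA_eq, pvBoth]
  rfl
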